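-- pv_equiv track=rewrite | github.com/conorpbrady/aoc2023 | 14/main.py | hm
-- ===== SOURCE A (Python) =====
-- def hm(rounds, mx, my):
--     hm = ''
--     for y in range(my):
--         line = ''
--         for x in range(mx):
--             if (x, y) in rounds:
--                 line += 'O'
--             else:
--                 line += '.'
--         hm += line + '\n'
--     return hm
-- ===== SOURCE B (Python) =====
-- def hm(rounds, mx, my):
--     w = max(mx, 0)
--     h = max(my, 0)
--     grid = [['.'] * w for _ in range(h)]
--     for x, y in rounds:
--         if 0 <= x < w and 0 <= y < h:
--             grid[y][x] = 'O'
--     return ''.join(''.join(row) + '\n' for row in grid)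
-- ===== Notes on version B (the rewrite author's own statement) =====
-- stated objective: faster
-- what changed: A scans every grid cell and does a linear membership test in rounds per cell (O(mx*my*|rounds|)); B allocates the '.'-filled grid once, scatters 'O' at each in-range coordinate of rounds, and joins the rows.
import Mathlib
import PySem

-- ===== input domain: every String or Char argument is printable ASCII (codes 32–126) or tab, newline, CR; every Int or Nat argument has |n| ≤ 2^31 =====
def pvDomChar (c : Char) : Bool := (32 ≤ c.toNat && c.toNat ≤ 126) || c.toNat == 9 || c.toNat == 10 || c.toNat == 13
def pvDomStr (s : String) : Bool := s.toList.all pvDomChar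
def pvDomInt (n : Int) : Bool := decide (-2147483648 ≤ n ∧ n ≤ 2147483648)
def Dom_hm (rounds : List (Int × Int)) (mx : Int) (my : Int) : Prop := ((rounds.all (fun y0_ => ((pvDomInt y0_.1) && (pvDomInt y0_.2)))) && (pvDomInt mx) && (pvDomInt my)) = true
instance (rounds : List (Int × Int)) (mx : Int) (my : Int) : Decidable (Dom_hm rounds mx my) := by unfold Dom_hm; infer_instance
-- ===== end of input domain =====

-- B replaces A's per-cell membership scan by building the grid once and scattering the
-- in-range coordinates of `rounds` onto it (asymptotically fewer membership tests).

-- ===== PORT A =====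
-- literal port: both `for` loops are folds over range(...); `(x, y) in rounds` is list membership;
-- `line += …` / `hm += line + '\n'` are string appends.
def hm (rounds : List (Int × Int)) (mx : Int) (my : Int) : String :=
  (PySem.List.pyRange 0 my 1).foldl (fun acc y =>
    acc ++ (((PySem.List.pyRange 0 mx 1).foldl (fun line x =>
      line ++ (if (x, y) ∈ rounds then "O" else ".")) "") ++ "\n")) ""

-- ===== PORT B =====
-- grid[y][x] = 'O' for an in-range coordinate (x, y)
def pvStep (w h : Int) (g : List (List Char)) (p : Int × Int) : List (List Char) :=
  if 0 ≤ p.1 ∧ p.1 < w ∧ 0 ≤ p.2 ∧ p.2 < h then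
    g.modify p.2.toNat (fun row => row.set p.1.toNat 'O')
  else g

def hm_alt (rounds : List (Int × Int)) (mx : Int) (my : Int) : String :=
  let w := max mx 0
  let h := max my 0
  let grid0 : List (List Char) := (List.range h.toNat).map (fun _ => List.replicate w.toNat '.')
  let grid := rounds.foldl (pvStep w h) grid0
  String.ofList ((grid.map (fun row => row ++ ['\n'])).flatten)

-- ===== PRECONDITION & SPEC =====
def Spec_hm (rounds : List (Int × Int)) (mx : Int) (my : Int) (out : String) : Prop := out = hm_alt rounds mx my
instance (rounds : List (Int × Int)) (mx : Int) (my : Int) (out : String) : Decidable (Spec_hm rounds mx my out) := by unfold Spec_hm; infer_instance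

-- ===== CLAIM (what is proved, stated in full; the proofs are below) =====
def Claim_equal_hm : Prop := ∀ (rounds : List (Int × Int)) (mx : Int) (my : Int), Dom_hm rounds mx my → Spec_hm rounds mx my (hm rounds mx my)

-- ===== LEMMAS AND PROOFS =====

-- the character A writes at cell (x, y)
def pvCell (rounds : List (Int × Int)) (x y : Int) : Char := if (x, y) ∈ rounds then 'O' else '.'

-- A's inner loop builds the row of cells
theorem pvInnerA (rounds : List (Int × Int)) (y : Int) (l : List Int) (s : String) :
    (l.foldl (fun line x => line ++ (if (x, y) ∈ rounds then "O" else ".")) s).toList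
      = s.toList ++ l.map (fun x => pvCell rounds x y) := by
  induction l generalizing s with
  | nil => simp
  | cons a t ih =>
      simp only [List.foldl_cons, List.map_cons, ih, pvCell]
      by_cases hmem : (a, y) ∈ rounds <;> simp [hmem]

-- A's outer loop concatenates the rows, each followed by '\n'
theorem pvOuterA (rounds : List (Int × Int)) (mx : Int) (l : List Int) (s : String) :
    (l.foldl (fun acc y =>
        acc ++ (((PySem.List.pyRange 0 mx 1).foldl (fun line x =>
          line ++ (if (x, y) ∈ rounds then "O" else ".")) "") ++ "\n")) s).toList
      = s.toList ++ l.flatMap (fun y =>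
          (PySem.List.pyRange 0 mx 1).map (fun x => pvCell rounds x y) ++ ['\n']) := by
  induction l generalizing s with
  | nil => simp
  | cons a t ih =>
      simp only [List.foldl_cons, List.flatMap_cons, ih]
      simp [pvInnerA]

theorem pvStep_length (w h : Int) (p : Int × Int) (g : List (List Char)) :
    (pvStep w h g p).length = g.length := by
  unfold pvStep; split <;> simp

theorem pvFold_length (w h : Int) (rs : List (Int × Int)) (g : List (List Char)) :
    (rs.foldl (pvStep w h) g).length = g.length := by
  induction rs generalizing g with
  | nil => rfl
  | cons p t ih => simpa [List.foldl_cons, pvStep_length] using ih (pvStep w h g p)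

theorem pvStep_rowlen (w h : Int) (p : Int × Int) (g : List (List Char)) (j : Nat) :
    ((pvStep w h g p).getD j []).length = ((g.getD j []).length) := by
  unfold pvStep
  split
  · simp only [List.getD_eq_getElem?_getD, List.getElem?_modify]
    by_cases hj : p.2.toNat = j
    · subst hj
      cases hx : g[p.2.toNat]? <;> simp
    · simp [hj]
  · rfl

theorem pvFold_rowlen (w h : Int) (rs : List (Int × Int)) (g : List (List Char)) (j : Nat) :
    ((rs.foldl (pvStep w h) g).getD j []).length = ((g.getD j []).length) := by
  induction rs generalizing g with
  | nil => rfl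
  | cons p t ih => rw [List.foldl_cons, ih (pvStep w h g p), pvStep_rowlen]

-- the scatter loop: cell (x, y) of the final grid is 'O' iff (x, y) occurs in rs
theorem pvScatter (w h : Int) (rs : List (Int × Int)) :
    ∀ (g : List (List Char)), g.length = h.toNat →
      (∀ j, j < g.length → (g.getD j []).length = w.toNat) →
      ∀ (x y : Nat), x < w.toNat → y < h.toNat →
        ((rs.foldl (pvStep w h) g).getD y []).getD x 'X'
          = if ((x : Int), (y : Int)) ∈ rs then 'O' else (g.getD y []).getD x 'X' := by
  induction rs with
  | nil => intro g _ _ x y _ _; simp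
  | cons p t ih =>
      intro g hlen hrow x y hx hy
      have hylt : y < g.length := by omega
      have hxlt : x < (g.getD y []).length := by rw [hrow y hylt]; exact hx
      have hg' : (pvStep w h g p).length = h.toNat := by rw [pvStep_length]; exact hlen
      have hr' : ∀ j, j < (pvStep w h g p).length → ((pvStep w h g p).getD j []).length = w.toNat := by
        intro j hj
        rw [pvStep_rowlen]
        exact hrow j (by rwa [pvStep_length] at hj)
      rw [List.foldl_cons, ih (pvStep w h g p) hg' hr' x y hx hy]
      by_cases hmem : ((x : Int), (y : Int)) ∈ t
      · simp [hmem]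
      · by_cases heq : p = ((x : Int), (y : Int))
        · -- this round lands exactly on cell (x, y)
          have hstep : pvStep w h g p = g.modify y (fun row => row.set x 'O') := by
            subst heq
            unfold pvStep
            rw [if_pos ⟨by omega, by omega, by omega, by omega⟩]
            simp
          have hxlt' : x < g[y].length := by
            rw [List.getD_eq_getElem?_getD, List.getElem?_eq_getElem hylt, Option.getD_some] at hxlt
            exact hxlt
          have hO : ((g.modify y (fun row => row.set x 'O')).getD y []).getD x 'X' = 'O' := by
            simp [List.getD_eq_getElem?_getD, List.getElem?_eq_getElem hylt, hxlt']
          rw [hstep, hO]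
          simp [heq, hmem]
        · -- this round does not touch cell (x, y)
          have heq' : ((x : Int), (y : Int)) ≠ p := fun hc => heq hc.symm
          have hval : ((pvStep w h g p).getD y []).getD x 'X' = (g.getD y []).getD x 'X' := by
            unfold pvStep
            split
            · rename_i hcond
              by_cases hj : p.2.toNat = y
              · have hp2 : p.2 = (y : Int) := by omega
                have hp1 : p.1 ≠ (x : Int) := by
                  intro hc; exact heq (by rw [← hc, ← hp2])
                have hp1n : p.1.toNat ≠ x := by omega
                simp [List.getD_eq_getElem?_getD, hj, List.getElem?_eq_getElem hylt, List.getElem?_set_ne hp1n]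
              · simp [List.getD_eq_getElem?_getD, hj]
            · rfl
          rw [hval]
          simp [hmem, heq']

-- the scattered grid is exactly row y ↦ [pvCell x y | x < w]
theorem pvGrid_eq (rounds : List (Int × Int)) (w h : Int) :
    rounds.foldl (pvStep w h) (List.replicate h.toNat (List.replicate w.toNat '.'))
      = (List.range h.toNat).map (fun y =>
          (List.range w.toNat).map (fun x => pvCell rounds (Int.ofNat x) (Int.ofNat y))) := by
  have hlen0 : (List.replicate h.toNat (List.replicate w.toNat '.')).length = h.toNat := by simp
  have hrow0 : ∀ j, j < (List.replicate h.toNat (List.replicate w.toNat '.')).length →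
      ((List.replicate h.toNat (List.replicate w.toNat '.')).getD j []).length = w.toNat := by
    intro j hj
    simp only [List.length_replicate] at hj
    simp [List.getD_eq_getElem?_getD, hj]
  apply List.ext_getElem
  · simp [pvFold_length]
  · intro y hy1 hy2
    have hylen : y < h.toNat := by simpa [pvFold_length] using hy1
    have hrl := pvFold_rowlen w h rounds (List.replicate h.toNat (List.replicate w.toNat '.')) y
    rw [List.getD_eq_getElem?_getD, List.getElem?_eq_getElem hy1, Option.getD_some] at hrl
    rw [hrow0 y (by simpa using hylen)] at hrl
    apply List.ext_getElem
    · rw [hrl]; simp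
    · intro x hx1 hx2
      have hxlen : x < w.toNat := by rwa [hrl] at hx1
      have key := pvScatter w h rounds _ hlen0 hrow0 x y hxlen hylen
      simp only [List.getD_eq_getElem?_getD] at key
      rw [List.getElem?_eq_getElem hy1, Option.getD_some,
          List.getElem?_eq_getElem hx1, Option.getD_some] at key
      rw [key]
      simp [pvCell, hylen, hxlen]

-- range(n) as a list of Ints
theorem pvRangeCast (n : Int) : PySem.List.pyRange 0 n 1 = (List.range n.toNat).map Int.ofNat := by
  rw [PySem.List.pyRange_one]
  simp only [Int.sub_zero]
  exact List.map_congr_left (fun k _ => by simp)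

theorem pvMaxToNat (n : Int) : (max n 0).toNat = n.toNat := by
  rcases le_total n 0 with hc | hc
  · rw [max_eq_right hc, Int.toNat_of_nonpos hc]; rfl
  · rw [max_eq_left hc]

-- ===== VERDICT (by name: the statement is the Claim_ definition above) =====
theorem hm_spec : Claim_equal_hm := by
  intro rounds mx my _
  unfold Spec_hm hm hm_alt
  apply String.toList_inj.mp
  rw [pvOuterA]
  simp only [String.toList_ofList, String.toList_empty, List.nil_append]
  rw [show ((List.range (max my 0).toNat).map (fun _ => List.replicate (max mx 0).toNat '.'))
        = List.replicate (max my 0).toNat (List.replicate (max mx 0).toNat '.') by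
      simp [List.map_const']]
  rw [pvGrid_eq, pvRangeCast, pvRangeCast, pvMaxToNat, pvMaxToNat]
  simp [List.map_map, List.flatMap_def, Function.comp_def]
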